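-- pv_equiv track=rewrite | github.com/lkpetrich/Preference-Voting | PrefVote.py | MinimaxPrefCount
-- ===== SOURCE A (Python) =====
-- def ModifiedPrefMat(PrefMat,Which):
-- 	n = len(PrefMat)
-- 	ModMat = [n*[0] for i in range(n)]
--
-- 	if Which == "wins":
-- 		for i in range(n):
-- 			for j in range(n):
-- 				if PrefMat[i][j] > PrefMat[j][i]:
-- 					ModMat[i][j] = PrefMat[i][j]
-- 				else:
-- 					ModMat[i][j] = 0
-- 	elif Which == "marg":
-- 		for i in range(n):
-- 			for j in range(n):
-- 				ModMat[i][j] = PrefMat[i][j] - PrefMat[j][i]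
-- 	elif Which == "oppo":
-- 		for i in range(n):
-- 			for j in range(n):
-- 				ModMat[i][j] = PrefMat[i][j]
--
-- 	return ModMat
--
-- def MinimaxPrefCount(PrefMat,Which):
-- 	ModMat = ModifiedPrefMat(PrefMat,Which)
--
-- 	n = len(PrefMat)
-- 	Scores = n*[0]
-- 	for k in range(n):
-- 		Score = None
-- 		for kx in range(n):
-- 			if kx == k: continue
-- 			NewScore = ModMat[kx][k]
-- 			if Score == None:
-- 				Score = NewScore
-- 			elif NewScore > Score:
-- 				Score = NewScore
--
-- 		Scores[k] = - Score if n > 1 else 0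
--
-- 	return Scores
-- ===== SOURCE B (Python) =====
-- def MinimaxPrefCount(PrefMat, Which):
--     n = len(PrefMat)
--     if n <= 1 or Which not in ("wins", "marg", "oppo"):
--         return n * [0]
--
--     def mod(i, j):
--         a = PrefMat[i][j]
--         if Which == "wins":
--             return a if a > PrefMat[j][i] else 0
--         if Which == "marg":
--             return a - PrefMat[j][i]
--         return a
--
--     return [-max(mod(kx, k) for kx in range(n) if kx != k) for k in range(n)]
-- ===== Notes on version B (the rewrite author's own statement) =====
-- stated objective: simpler
-- what changed: B drops the intermediate modified matrix entirely: one fused pass computes each candidate's column maximum on the fly from PrefMat (with early zero return for n<=1 or an unknown Which), instead of A's two n-by-n passes that first materialise ModMat and then scan its columns with an Option-style accumulator.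
import Mathlib
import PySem

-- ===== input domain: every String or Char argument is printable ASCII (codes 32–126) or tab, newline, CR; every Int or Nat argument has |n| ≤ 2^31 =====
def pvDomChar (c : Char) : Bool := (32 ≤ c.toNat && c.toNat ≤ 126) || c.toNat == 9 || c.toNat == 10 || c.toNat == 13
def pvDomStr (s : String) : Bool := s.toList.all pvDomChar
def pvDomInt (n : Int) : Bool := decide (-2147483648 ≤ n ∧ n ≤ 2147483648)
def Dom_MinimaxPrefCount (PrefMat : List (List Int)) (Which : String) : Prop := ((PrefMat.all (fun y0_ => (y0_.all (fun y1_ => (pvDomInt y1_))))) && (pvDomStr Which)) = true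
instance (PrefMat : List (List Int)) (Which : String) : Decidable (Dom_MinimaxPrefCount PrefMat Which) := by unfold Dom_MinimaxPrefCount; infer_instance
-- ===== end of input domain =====

-- B inlines the "modified matrix" into one fused column-max pass; equivalence of return values (A mutates only its own locals).

-- ===== PORT A =====
-- Python indexing PrefMat[i][j] with 0 ≤ i,j < n is ported as getD (exact in range; out-of-range inputs are excluded by Pre_).
def ModifiedPrefMat (PrefMat : List (List Int)) (Which : String) : List (List Int) :=
  let n := PrefMat.length
  let ModMat := (List.range n).map (fun _ => List.replicate n (0 : Int))
  if Which = "wins" then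
    (List.range n).foldl (fun M i =>
      (List.range n).foldl (fun M j =>
        M.set i ((M.getD i []).set j
          (if (PrefMat.getD i []).getD j 0 > (PrefMat.getD j []).getD i 0
           then (PrefMat.getD i []).getD j 0 else 0))) M) ModMat
  else if Which = "marg" then
    (List.range n).foldl (fun M i =>
      (List.range n).foldl (fun M j =>
        M.set i ((M.getD i []).set j
          ((PrefMat.getD i []).getD j 0 - (PrefMat.getD j []).getD i 0))) M) ModMat
  else if Which = "oppo" then
    (List.range n).foldl (fun M i =>
      (List.range n).foldl (fun M j =>
        M.set i ((M.getD i []).set j ((PrefMat.getD i []).getD j 0))) M) ModMat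
  else ModMat

def MinimaxPrefCount (PrefMat : List (List Int)) (Which : String) : List Int :=
  let ModMat := ModifiedPrefMat PrefMat Which
  let n := PrefMat.length
  let Scores := List.replicate n (0 : Int)
  (List.range n).foldl (fun Scores k =>
    let Score := (List.range n).foldl (fun Score kx =>
      if kx = k then Score
      else
        let NewScore := (ModMat.getD kx []).getD k 0
        match Score with
        | none => some NewScore
        | some s => if NewScore > s then some NewScore else some s) (none : Option Int)
    -- '- Score if n > 1 else 0': when n > 1 the inner loop visited some kx ≠ k, so Score is not None; .getD 0 is never the default there
    Scores.set k (if n > 1 then -(Score.getD 0) else 0)) Scores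

-- ===== PORT B =====
def pvMod (PrefMat : List (List Int)) (Which : String) (i j : Nat) : Int :=
  let a := (PrefMat.getD i []).getD j 0
  if Which = "wins" then (if a > (PrefMat.getD j []).getD i 0 then a else 0)
  else if Which = "marg" then a - (PrefMat.getD j []).getD i 0
  else a

def MinimaxPrefCount_alt (PrefMat : List (List Int)) (Which : String) : List Int :=
  let n := PrefMat.length
  if n ≤ 1 ∨ (Which ≠ "wins" ∧ Which ≠ "marg" ∧ Which ≠ "oppo") then
    List.replicate n 0
  else
    -- max(...) over a nonempty generator: PySem.List.max?; the .getD 0 default is unreachable since n ≥ 2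
    (List.range n).map (fun k =>
      -((PySem.List.max? (((List.range n).filter (fun kx => kx ≠ k)).map
          (fun kx => pvMod PrefMat Which kx k)) (fun y => y)).getD 0))

-- ===== PRECONDITION & SPEC =====
-- Pre_ excludes exactly the inputs where Python A raises IndexError: a row shorter than the
-- number of rows while Which names one of the three matrices (only then is PrefMat indexed).
def Pre_MinimaxPrefCount (PrefMat : List (List Int)) (Which : String) : Prop :=
  (Which = "wins" ∨ Which = "marg" ∨ Which = "oppo") →
    ∀ r ∈ PrefMat, PrefMat.length ≤ r.length
instance (PrefMat : List (List Int)) (Which : String) : Decidable (Pre_MinimaxPrefCount PrefMat Which) := by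
  unfold Pre_MinimaxPrefCount; infer_instance
def pvWitness_MinimaxPrefCount : List (List Int) × String := ([[0, 3], [2, 0]], "wins")

def Spec_MinimaxPrefCount (PrefMat : List (List Int)) (Which : String) (out : List Int) : Prop := out = MinimaxPrefCount_alt PrefMat Which
instance (PrefMat : List (List Int)) (Which : String) (out : List Int) : Decidable (Spec_MinimaxPrefCount PrefMat Which out) := by unfold Spec_MinimaxPrefCount; infer_instance

-- ===== CLAIM (what is proved, stated in full; the proofs are below) =====
def Claim_equal_MinimaxPrefCount : Prop := ∀ (PrefMat : List (List Int)) (Which : String), Dom_MinimaxPrefCount PrefMat Which → Pre_MinimaxPrefCount PrefMat Which → Spec_MinimaxPrefCount PrefMat Which (MinimaxPrefCount PrefMat Which)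

-- ===== LEMMAS AND PROOFS =====
theorem pv_inner_row {α : Type} (v : Nat → α) (dR : List α) (i : Nat) :
    ∀ (js : List Nat) (M : List (List α)),
      js.foldl (fun M j => M.set i ((M.getD i dR).set j (v j))) M
        = M.set i (js.foldl (fun r j => r.set j (v j)) (M.getD i dR)) := by
  intro js
  induction js with
  | nil =>
    intro M
    simp only [List.foldl_nil]
    by_cases h : i < M.length
    · rw [List.getD_eq_getElem?_getD, List.getElem?_eq_getElem h]
      simp
    · rw [List.set_eq_of_length_le (by omega)]
  | cons j js ih =>
    intro M
    simp only [List.foldl_cons]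
    rw [ih]
    by_cases h : i < M.length
    · have : (M.set i ((M.getD i dR).set j (v j))).getD i dR = (M.getD i dR).set j (v j) := by
        rw [List.getD_eq_getElem?_getD, List.getElem?_set_self h]; rfl
      rw [this, List.set_set]
    · have hle : M.length ≤ i := by omega
      have h1 : (M.set i ((M.getD i dR).set j (v j))) = M := List.set_eq_of_length_le hle
      rw [h1, List.set_eq_of_length_le hle, List.set_eq_of_length_le hle]

theorem pv_optmax_some (k : Nat) (v : Nat → Int) :
    ∀ (l : List Nat) (a : Int),
      l.foldl (fun Score kx => if kx = k then Score else
        match Score with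
        | none => some (v kx)
        | some s => if v kx > s then some (v kx) else some s) (some a)
        = some (((l.filter (fun kx => kx ≠ k)).map v).foldl max a) := by
  intro l
  induction l with
  | nil => intro a; simp
  | cons x l ih =>
    intro a
    by_cases hx : x = k
    · simp [hx, ih]
    · simp only [List.foldl_cons, if_neg hx, List.filter_cons, ne_eq, hx, not_false_eq_true,
        decide_true, if_true, if_false, List.map_cons]
      by_cases hv : v x > a
      · rw [if_pos hv, ih, max_eq_right (le_of_lt hv)]
      · rw [if_neg hv, ih, max_eq_left (by omega)]

theorem pv_optmax (k : Nat) (v : Nat → Int) :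
    ∀ (l : List Nat),
      l.foldl (fun Score kx => if kx = k then Score else
        match Score with
        | none => some (v kx)
        | some s => if v kx > s then some (v kx) else some s) none
        = match (l.filter (fun kx => kx ≠ k)).map v with
          | [] => none
          | x :: xs => some (xs.foldl max x) := by
  intro l
  induction l with
  | nil => simp
  | cons x l ih =>
    by_cases hx : x = k
    · simpa [hx] using ih
    · simp only [List.foldl_cons, if_neg hx, List.filter_cons, ne_eq, hx, not_false_eq_true,
        decide_true, if_true, if_false, List.map_cons]
      rw [pv_optmax_some]
theorem pv_fold_write {α : Type} (f : Nat → α → α) (d : α) :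
    ∀ (m : Nat) (L : List α), m ≤ L.length →
      (List.range m).foldl (fun M i => M.set i (f i (M.getD i d))) L
        = (List.range m).map (fun i => f i (L.getD i d)) ++ L.drop m := by
  intro m
  induction m with
  | zero => intro L h; simp
  | succ m ih =>
    intro L h
    rw [List.range_succ, List.foldl_append, List.map_append, ih L (by omega)]
    simp only [List.foldl_cons, List.foldl_nil, List.map_cons, List.map_nil]
    have hm : m < L.length := by omega
    have hdrop : L.drop m = L[m] :: L.drop (m + 1) := List.drop_eq_getElem_cons hm
    have hgetD : L[m]?.getD d = L[m] := by rw [List.getElem?_eq_getElem hm]; rfl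
    have hlen : (List.map (fun i => f i (L.getD i d)) (List.range m)).length = m := by simp
    rw [hdrop]
    have h2 : (List.map (fun i => f i (L.getD i d)) (List.range m) ++ L[m] :: L.drop (m + 1)).getD m d = L[m] := by
      rw [List.getD_eq_getElem?_getD, List.getElem?_append_right (by omega)]
      simp [hlen, hgetD]
    rw [h2, List.set_append, hlen]
    simp only [lt_irrefl, if_false, Nat.sub_self, List.append_assoc, List.cons_append, List.nil_append, hgetD]
    simp only [List.set_cons_zero, List.getD_eq_getElem?_getD, hgetD]
-- specialized write-only fold
theorem pv_fold_set {α : Type} (g : Nat → α) (m : Nat) (L : List α) (h : m ≤ L.length) :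
    (List.range m).foldl (fun M i => M.set i (g i)) L
      = (List.range m).map g ++ L.drop m := by
  have := pv_fold_write (fun i _ => g i) (g 0) m L h
  simpa using this
-- entry lookup in a range-indexed map
theorem pv_getD_map_range {α : Type} (g : Nat → α) (n i : Nat) (d : α) (hi : i < n) :
    ((List.range n).map g).getD i d = g i := by
  rw [List.getD_eq_getElem?_getD, List.getElem?_map, List.getElem?_range hi]
  rfl

-- the double loop writing entry (i, j) := v i j over an n×n zero matrix
theorem pv_matrix_fold (v : Nat → Nat → Int) (n : Nat) :
    (List.range n).foldl (fun M i =>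
        (List.range n).foldl (fun M j => M.set i ((M.getD i []).set j (v i j))) M)
      ((List.range n).map (fun _ => List.replicate n (0 : Int)))
      = (List.range n).map (fun i => (List.range n).map (v i)) := by
  have hstep : (fun (M : List (List Int)) i =>
      (List.range n).foldl (fun M j => M.set i ((M.getD i []).set j (v i j))) M)
      = (fun M i => M.set i ((fun i r => (List.range n).foldl (fun r j => r.set j (v i j)) r)
          i (M.getD i []))) := by
    funext M i
    exact pv_inner_row (v i) [] i (List.range n) M
  rw [hstep, pv_fold_write (fun i r => (List.range n).foldl (fun r j => r.set j (v i j)) r) []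
    n ((List.range n).map (fun _ => List.replicate n (0 : Int))) (by simp)]
  have hdrop : (((List.range n).map (fun _ => List.replicate n (0:Int))).drop n) = [] := by simp
  rw [hdrop, List.append_nil]
  apply List.map_congr_left
  intro i hi
  rw [pv_getD_map_range _ n i [] (List.mem_range.mp hi)]
  have hrow : (fun (r : List Int) j => r.set j (v i j))
      = (fun r j => r.set j ((fun j (_ : Int) => v i j) j (r.getD j 0))) := rfl
  rw [hrow, pv_fold_write (fun j _ => v i j) 0 n (List.replicate n 0) (by simp)]
  simp
theorem pv_scores_zero (n : Nat) (F : Nat → Option Int) (hn : n ≤ 1) :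
    (List.range n).map (fun k => if n > 1 then -((F k).getD 0) else 0) = List.replicate n 0 := by
  rw [show (fun k => if n > 1 then -((F k).getD 0) else 0) = fun _ : Nat => (0 : Int) from
      funext fun k => if_neg (by omega)]
  simp [List.map_const']

theorem pv_zero_entry (n kx k : Nat) :
    (((List.range n).map (fun _ => List.replicate n (0 : Int))).getD kx []).getD k 0 = 0 := by
  rcases lt_or_ge kx n with h | h
  · rw [pv_getD_map_range _ n kx [] h]
    rcases lt_or_ge k n with h2 | h2
    · rw [List.getD_replicate _ h2]
    · rw [List.getD_eq_getElem?_getD, List.getElem?_eq_none (by simpa using h2)]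
      rfl
  · have houter : ((List.range n).map (fun _ => List.replicate n (0 : Int))).getD kx [] = [] := by
      rw [List.getD_eq_getElem?_getD, List.getElem?_eq_none (by simpa using h)]
      rfl
    rw [houter]
    rfl

theorem pv_total (P : List (List Int)) (W : String) :
    MinimaxPrefCount P W = MinimaxPrefCount_alt P W := by
  simp only [MinimaxPrefCount]
  rw [pv_fold_set _ _ _ (by simp),
      show List.drop P.length (List.replicate P.length (0 : Int)) = [] from by simp,
      List.append_nil]
  by_cases hn1 : P.length ≤ 1
  · rw [pv_scores_zero _ _ hn1]
    simp only [MinimaxPrefCount_alt]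
    rw [if_pos (Or.inl hn1)]
  · by_cases hW : W = "wins" ∨ W = "marg" ∨ W = "oppo"
    · -- main case: n ≥ 2, known matrix kind
      have hM : ModifiedPrefMat P W
          = (List.range P.length).map (fun i => (List.range P.length).map (fun j => pvMod P W i j)) := by
        rcases hW with h | h | h <;> subst h <;> unfold ModifiedPrefMat
        · rw [if_pos rfl, pv_matrix_fold]
          simp [pvMod]
        · rw [if_neg (by decide), if_pos rfl, pv_matrix_fold]
          simp [pvMod]
        · rw [if_neg (by decide), if_neg (by decide), if_pos rfl, pv_matrix_fold]
          simp [pvMod]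
      rw [hM]
      simp only [MinimaxPrefCount_alt]
      rw [if_neg (by
        rintro (h | ⟨h1, h2, h3⟩)
        · omega
        · rcases hW with h | h | h <;> contradiction)]
      apply List.map_congr_left
      intro k hk
      rw [if_pos (by omega), pv_optmax]
      have hmapv : (((List.range P.length).filter (fun kx => kx ≠ k)).map
            (fun kx => (((List.range P.length).map (fun i => (List.range P.length).map
              (fun j => pvMod P W i j))).getD kx []).getD k 0))
          = ((List.range P.length).filter (fun kx => kx ≠ k)).map (fun kx => pvMod P W kx k) := by
        apply List.map_congr_left
        intro kx hkx
        have hkxn : kx < P.length := List.mem_range.mp (List.mem_of_mem_filter hkx)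
        rw [pv_getD_map_range _ _ kx [] hkxn,
            pv_getD_map_range _ _ k 0 (List.mem_range.mp hk)]
      rw [hmapv]
      rcases hlst : ((List.range P.length).filter (fun kx => kx ≠ k)).map (fun kx => pvMod P W kx k)
          with _ | ⟨x, xs⟩
      · exfalso
        have hfil : (List.range P.length).filter (fun kx => kx ≠ k) = [] :=
          List.map_eq_nil_iff.mp hlst
        have h0 : (0 : Nat) ∈ List.range P.length := List.mem_range.mpr (by omega)
        have h1 : (1 : Nat) ∈ List.range P.length := List.mem_range.mpr (by omega)
        have := List.filter_eq_nil_iff.mp hfil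
        have e0 := this 0 h0
        have e1 := this 1 h1
        simp at e0 e1
        omega
      · rw [PySem.List.max?_id_cons]
    · -- unknown Which: both sides are all-zero
      rw [not_or, not_or] at hW
      obtain ⟨hw1, hw2, hw3⟩ := hW
      have hM : ModifiedPrefMat P W
          = (List.range P.length).map (fun _ => List.replicate P.length 0) := by
        unfold ModifiedPrefMat
        rw [if_neg hw1, if_neg hw2, if_neg hw3]
      rw [hM]
      simp only [MinimaxPrefCount_alt]
      rw [if_pos (Or.inr ⟨hw1, hw2, hw3⟩)]
      refine Eq.trans (b := (List.range P.length).map (fun _ => (0 : Int))) (List.map_congr_left ?_)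
        (by simp [List.map_const'])
      intro k hk
      show _ = (0 : Int)
      rw [if_pos (by omega), pv_optmax]
      have hmapv : (((List.range P.length).filter (fun kx => kx ≠ k)).map
            (fun kx => (((List.range P.length).map (fun _ => List.replicate P.length (0:Int))).getD kx []).getD k 0))
          = ((List.range P.length).filter (fun kx => kx ≠ k)).map (fun _ => (0 : Int)) := by
        apply List.map_congr_left
        intro kx _
        rw [pv_zero_entry]
      rw [hmapv]
      rcases hlst : ((List.range P.length).filter (fun kx => kx ≠ k)).map (fun _ => (0 : Int))
          with _ | ⟨x, xs⟩
      · simp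
      · have hx : x = 0 := by
          have := List.mem_map.mp (by rw [hlst]; exact List.mem_cons_self)
          obtain ⟨_, _, hx⟩ := this
          omega
        have hxs : ∀ y ∈ xs, y = (0 : Int) := by
          intro y hy
          have : y ∈ ((List.range P.length).filter (fun kx => kx ≠ k)).map (fun _ => (0 : Int)) := by
            rw [hlst]; exact List.mem_cons_of_mem _ hy
          obtain ⟨_, _, h⟩ := List.mem_map.mp this
          omega
        have : xs.foldl max x = 0 := by
          subst hx
          clear hlst
          induction xs with
          | nil => simp
          | cons y ys ih =>
            have hy := hxs y List.mem_cons_self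
            subst hy
            simpa using ih (fun z hz => hxs z (List.mem_cons_of_mem _ hz))
        simp [this]

-- ===== VERDICT (by name: the statement is the Claim_ definition above) =====
theorem MinimaxPrefCount_spec : Claim_equal_MinimaxPrefCount := by
  intro PrefMat Which _ _
  unfold Spec_MinimaxPrefCount
  exact pv_total PrefMat Which
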